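-- pv_equiv track=rewrite | github.com/vygstep/subsidence | app/src/subsidence/data/importers.py | _extract_note_unconformity_ref
-- ===== SOURCE A (Python) =====
-- def _extract_note_unconformity_ref(note: str | None) -> str | None:
--     if not note:
--         return None
--     for chunk in note.split('|'):
--         chunk = chunk.strip()
--         if chunk.startswith('unconformity_ref='):
--             value = chunk.split('=', 1)[1].strip()
--             return value or None
--     return None
-- ===== SOURCE B (Python) =====
-- def _extract_note_unconformity_ref(note):
--     # Single left-to-right scan: no split(), no intermediate chunk list.
--     if not note:
--         return None
--     prefix = 'unconformity_ref='
--     i = 0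
--     while True:
--         j = i
--         while j < len(note) and note[j].isspace():
--             j += 1
--         if note.startswith(prefix, j):
--             k = note.find('|', j)
--             end = len(note) if k == -1 else k
--             value = note[j + len(prefix):end].strip()
--             return value or None
--         p = note.find('|', i)
--         if p == -1:
--             return None
--         i = p + 1
-- ===== Notes on version B (the rewrite author's own statement) =====
-- stated objective: alternative
-- what changed: Replaces A's split-into-chunks-then-loop (strip/startswith on each chunk) with a single left-to-right scan that at each chunk boundary skips whitespace, tests the key prefix in place, and slices the value up to the next separator, never materialising the chunk list.
import Mathlib
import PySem

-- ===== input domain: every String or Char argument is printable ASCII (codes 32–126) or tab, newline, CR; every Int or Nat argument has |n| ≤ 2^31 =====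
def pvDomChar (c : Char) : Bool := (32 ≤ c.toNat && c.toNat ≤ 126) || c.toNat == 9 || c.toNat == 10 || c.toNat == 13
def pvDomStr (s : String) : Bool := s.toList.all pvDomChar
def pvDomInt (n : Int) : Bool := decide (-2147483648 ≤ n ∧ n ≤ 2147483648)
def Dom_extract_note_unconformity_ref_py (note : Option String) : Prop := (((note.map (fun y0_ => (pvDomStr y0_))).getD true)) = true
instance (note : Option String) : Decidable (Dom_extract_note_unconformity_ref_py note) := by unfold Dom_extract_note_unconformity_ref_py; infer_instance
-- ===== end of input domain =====

-- B replaces A's split('|') + per-chunk strip/startswith loop by a single left-to-right scan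
-- over the string (alternative decomposition, same O(n) cost; return value only, no mutation).

-- ===== PORT A =====
-- the for-chunk loop of A, over the chunk list produced by note.split('|')
def pvLoopA : List (List Char) → Option String
  | [] => none
  | chunk :: rest =>
    let c := PySem.Chars.strip chunk
    if PySem.Chars.startswith c ("unconformity_ref=".toList) then
      -- chunk.split('=', 1)[1]  (the index-1 element exists here since c contains '=';
      -- the getD default is unreachable in this branch)
      let value := PySem.Chars.strip ((PySem.Chars.splitOnMax c ['='] 1).getD 1 [])
      if value = [] then none else some (String.mk value)   -- return value or None
    else pvLoopA rest

def extract_note_unconformity_ref_py (note : Option String) : Option String :=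
  match note with
  | none => none
  | some s =>
    if s = "" then none    -- if not note: return None
    else pvLoopA (PySem.Chars.splitOn s.toList ['|'])

-- ===== PORT B =====
-- Source B's index arithmetic becomes suffix recursion: position i ↦ the suffix of the string
-- starting at i (exact: every step reads the same characters Source B reads).
-- p = note.find('|', i); i = p + 1  ↦  the suffix after the first '|' (none = no pipe, p == -1)
def pvSkipPipe : List Char → Option (List Char)
  | [] => none
  | c :: t => if c = '|' then some t else pvSkipPipe t

theorem pvSkipPipe_length {cs t : List Char} (h : pvSkipPipe cs = some t) :
    t.length < cs.length := by
  induction cs with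
  | nil => simp [pvSkipPipe] at h
  | cons c r ih =>
    by_cases hc : c = '|'
    · simp [pvSkipPipe, hc] at h; simp [← h]
    · simp [pvSkipPipe, hc] at h
      exact Nat.lt_trans (ih h) (by simp)

-- the outer while-loop of Source B, one call per boundary position i
def pvScan (cs : List Char) : Option String :=
  -- inner while: j += 1 while note[j].isspace()
  let j := cs.dropWhile PySem.Chars.isspace
  if ("unconformity_ref=".toList).isPrefixOf j then      -- note.startswith(prefix, j)
    -- note[j+17:end] with end = first '|' at index ≥ j (or len), then .strip()
    let value := PySem.Chars.strip ((j.drop 17).takeWhile (· ≠ '|'))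
    if value = [] then none else some (String.mk value)  -- return value or None
  else
    match h : pvSkipPipe cs with
    | none => none                                       -- p == -1: return None
    | some t => pvScan t
termination_by cs.length
decreasing_by exact pvSkipPipe_length h

def extract_note_unconformity_ref_py_alt (note : Option String) : Option String :=
  match note with
  | none => none
  | some s =>
    if s = "" then none    -- if not note: return None
    else pvScan s.toList

-- ===== PRECONDITION & SPEC =====
def Spec_extract_note_unconformity_ref_py (note : Option String) (out : Option String) : Prop := out = extract_note_unconformity_ref_py_alt note
instance (note : Option String) (out : Option String) : Decidable (Spec_extract_note_unconformity_ref_py note out) := by unfold Spec_extract_note_unconformity_ref_py; infer_instance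

-- ===== CLAIM (what is proved, stated in full; the proofs are below) =====
def Claim_equal_extract_note_unconformity_ref_py : Prop := ∀ (note : Option String), Dom_extract_note_unconformity_ref_py note → Spec_extract_note_unconformity_ref_py note (extract_note_unconformity_ref_py note)

-- ===== LEMMAS AND PROOFS =====

-- the whitespace predicate and the prefix, abbreviated for the proofs
def pvWs : Char → Bool := PySem.Chars.isspace
def pvPre : List Char := "unconformity_ref=".toList

-- structural characterisation of split('|')
def pvSplitP : List Char → List (List Char)
  | [] => [[]]
  | c :: t => if c = '|' then [] :: pvSplitP t else (pvSplitP t).modifyHead (c :: ·)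

theorem pvSplitP_ne_nil (l : List Char) : pvSplitP l ≠ [] := by
  cases l with
  | nil => simp [pvSplitP]
  | cons c t =>
    simp only [pvSplitP]
    split
    · simp
    · exact fun h => pvSplitP_ne_nil t (List.modifyHead_eq_nil_iff.mp h)

theorem pv_go_eq (l : List Char) : ∀ (fuel : Nat) (cur : List Char) (acc : List (List Char)),
    l.length ≤ fuel →
    PySem.Chars.splitOn.go ['|'] fuel l cur acc
      = acc.reverse ++ (pvSplitP l).modifyHead (cur.reverse ++ ·) := by
  induction l with
  | nil =>
    intro fuel cur acc _
    cases fuel <;> rw [PySem.Chars.splitOn.go] <;> simp [pvSplitP]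
  | cons c rest ih =>
    intro fuel cur acc hf
    obtain ⟨hd, tl, hsp⟩ : ∃ hd tl, pvSplitP rest = hd :: tl := by
      cases h : pvSplitP rest with
      | nil => exact absurd h (pvSplitP_ne_nil rest)
      | cons a b => exact ⟨a, b, rfl⟩
    cases fuel with
    | zero => simp at hf
    | succ f =>
      rw [PySem.Chars.splitOn.go]
      by_cases hc : c = '|'
      · have hpre : ['|'].isPrefixOf (c :: rest) = true := by
          simp [List.isPrefixOf, hc]
        rw [hpre]
        simp only [if_true, List.length_cons, List.length_nil, List.drop_succ_cons, List.drop_zero]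
        rw [ih f [] (cur.reverse :: acc) (by simpa using Nat.succ_le_succ_iff.mp hf)]
        simp [pvSplitP, hc, hsp]
      · have hpre : ['|'].isPrefixOf (c :: rest) = false := by
          simp [List.isPrefixOf]
          intro h; exact absurd h.symm hc
        rw [hpre]
        simp only [Bool.false_eq_true, if_false]
        rw [ih f (c :: cur) acc (by simpa using Nat.succ_le_succ_iff.mp hf)]
        simp [pvSplitP, hc, hsp]

theorem pv_splitOn_eq (l : List Char) : PySem.Chars.splitOn l ['|'] = pvSplitP l := by
  obtain ⟨hd, tl, hsp⟩ : ∃ hd tl, pvSplitP l = hd :: tl := by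
    cases h : pvSplitP l with
    | nil => exact absurd h (pvSplitP_ne_nil l)
    | cons a b => exact ⟨a, b, rfl⟩
  rw [PySem.Chars.splitOn, pv_go_eq l (l.length + 1) [] [] (by omega)]
  simp [hsp]

-- splitOnMax with maxsplit = 1 when '=' occurs
theorem pv_go0 (sep : List Char) (fuel : Nat) (l cur : List Char) (acc : List (List Char)) :
    PySem.Chars.splitOnMax.go sep fuel 0 l cur acc = ((cur.reverse ++ l) :: acc).reverse := by
  cases fuel with
  | zero => rw [PySem.Chars.splitOnMax.go]
  | succ f => cases l with
    | nil => rw [PySem.Chars.splitOnMax.go] <;> simp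
    | cons c r => rw [PySem.Chars.splitOnMax.go]; simp

theorem pv_goMax_eq (l : List Char) : ∀ (fuel : Nat) (cur : List Char) (acc : List (List Char)),
    l.length ≤ fuel → '=' ∈ l →
    PySem.Chars.splitOnMax.go ['='] fuel 1 l cur acc
      = acc.reverse ++ [cur.reverse ++ l.takeWhile (· ≠ '='), l.drop ((l.takeWhile (· ≠ '=')).length + 1)] := by
  induction l with
  | nil => intro fuel cur acc _ hm; simp at hm
  | cons c rest ih =>
    intro fuel cur acc hf hm
    cases fuel with
    | zero => simp at hf
    | succ f =>
      rw [PySem.Chars.splitOnMax.go]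
      simp only [Nat.succ_ne_zero, if_false, one_ne_zero]
      by_cases hc : c = '='
      · have hpre : ['='].isPrefixOf (c :: rest) = true := by simp [List.isPrefixOf, hc]
        rw [hpre]
        simp only [if_true]
        rw [pv_go0]
        simp [List.takeWhile_cons, hc]
      · have hpre : ['='].isPrefixOf (c :: rest) = false := by
          simp [List.isPrefixOf]
          intro h; exact absurd h.symm hc
        rw [hpre]
        simp only [Bool.false_eq_true, if_false]
        have hm' : '=' ∈ rest := by cases hm with
          | head => exact absurd rfl hc
          | tail _ h => exact h
        rw [ih f (c :: cur) acc (by simpa using Nat.succ_le_succ_iff.mp hf) hm']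
        simp [List.takeWhile_cons, hc]

theorem pv_splitOnMax_eq (l : List Char) (h : '=' ∈ l) :
    PySem.Chars.splitOnMax l ['='] 1
      = [l.takeWhile (· ≠ '='), l.drop ((l.takeWhile (· ≠ '=')).length + 1)] := by
  rw [PySem.Chars.splitOnMax]
  simp only [show ¬((1 : Int) < 0) by norm_num, if_false]
  rw [show ((1 : Int)).toNat = 1 from rfl, pv_goMax_eq l (l.length + 1) [] [] (by omega) h]
  simp

-- strip facts
theorem pv_rstrip_nil_iff (r : List Char) :
    PySem.Chars.rstrip r = [] ↔ PySem.Chars.lstrip r = [] := by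
  simp [PySem.Chars.rstrip, PySem.Chars.lstrip, List.dropWhile_eq_nil_iff]

theorem pv_rstrip_cons (c : Char) (r : List Char) :
    PySem.Chars.rstrip (c :: r)
      = if PySem.Chars.rstrip r = [] then (if pvWs c then [] else [c])
        else c :: PySem.Chars.rstrip r := by
  rw [PySem.Chars.rstrip, List.reverse_cons, List.dropWhile_append]
  by_cases hr : PySem.Chars.rstrip r = []
  · have he : (List.dropWhile PySem.Chars.isspace r.reverse).isEmpty = true := by
      have := hr; rw [PySem.Chars.rstrip] at this
      simpa [List.isEmpty_iff] using congrArg List.reverse this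
    rw [if_pos he, if_pos hr]
    by_cases hw : pvWs c <;> simp [pvWs, List.dropWhile_cons] at hw ⊢ <;> simp [hw]
  · have he : (List.dropWhile PySem.Chars.isspace r.reverse).isEmpty = false := by
      rw [PySem.Chars.rstrip] at hr
      cases h : List.dropWhile PySem.Chars.isspace r.reverse with
      | nil => exact absurd (by simp [h]) hr
      | cons a b => simp
    rw [if_neg hr, he]
    simp [PySem.Chars.rstrip]

theorem pv_lstrip_rstrip (t : List Char) :
    PySem.Chars.lstrip (PySem.Chars.rstrip t) = PySem.Chars.rstrip (PySem.Chars.lstrip t) := by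
  induction t with
  | nil => rfl
  | cons c r ih =>
    rw [pv_rstrip_cons]
    by_cases hw : pvWs c
    · have hl : PySem.Chars.lstrip (c :: r) = PySem.Chars.lstrip r := by
        simp [PySem.Chars.lstrip, List.dropWhile_cons]; intro h; exact absurd hw (by simp [pvWs, h])
      by_cases hr : PySem.Chars.rstrip r = []
      · rw [if_pos hr, if_pos hw, hl, (pv_rstrip_nil_iff r).mp hr]
        rfl
      · rw [if_neg hr, hl, ← ih]
        simp [PySem.Chars.lstrip, List.dropWhile_cons, show PySem.Chars.isspace c = true from hw]
    · have hl : PySem.Chars.lstrip (c :: r) = c :: r := by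
        simp [PySem.Chars.lstrip, List.dropWhile_cons, show PySem.Chars.isspace c = false by
          simpa [pvWs] using hw]
      rw [hl, pv_rstrip_cons]
      by_cases hr : PySem.Chars.rstrip r = [] <;>
        simp [hr, hw, PySem.Chars.lstrip, List.dropWhile_cons,
          show PySem.Chars.isspace c = false by simpa [pvWs] using hw]

theorem pv_dropWhile_idem (p : Char → Bool) (l : List Char) :
    List.dropWhile p (List.dropWhile p l) = List.dropWhile p l := by
  induction l with
  | nil => rfl
  | cons c r ih =>
    rw [List.dropWhile_cons]
    by_cases h : p c = true
    · simpa [h] using ih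
    · simp [h, List.dropWhile_cons]

theorem pv_rstrip_idem (l : List Char) :
    PySem.Chars.rstrip (PySem.Chars.rstrip l) = PySem.Chars.rstrip l := by
  simp [PySem.Chars.rstrip, pv_dropWhile_idem]

theorem pv_strip_rstrip (t : List Char) :
    PySem.Chars.strip (PySem.Chars.rstrip t) = PySem.Chars.strip t := by
  rw [PySem.Chars.strip, PySem.Chars.strip, pv_lstrip_rstrip, pv_rstrip_idem]

theorem pv_rstrip_pre_append (t : List Char) :
    PySem.Chars.rstrip (pvPre ++ t) = pvPre ++ PySem.Chars.rstrip t := by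
  rw [PySem.Chars.rstrip, List.reverse_append, List.dropWhile_append]
  by_cases he : (List.dropWhile PySem.Chars.isspace t.reverse).isEmpty = true
  · rw [if_pos he]
    rw [show List.dropWhile PySem.Chars.isspace pvPre.reverse = pvPre.reverse by decide]
    simp [PySem.Chars.rstrip, List.isEmpty_iff.mp he]
  · rw [if_neg he]
    simp [PySem.Chars.rstrip]

-- structure of pvSplitP: first chunk, then the rest
theorem pv_splitP_struct (cs : List Char) :
    (cs.dropWhile (· ≠ '|') = [] ∧ pvSplitP cs = [cs.takeWhile (· ≠ '|')]) ∨
    (∃ r, cs.dropWhile (· ≠ '|') = '|' :: r ∧ pvSplitP cs = cs.takeWhile (· ≠ '|') :: pvSplitP r) := by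
  induction cs with
  | nil => left; exact ⟨rfl, rfl⟩
  | cons c t ih =>
    by_cases hc : c = '|'
    · subst hc
      right
      refine ⟨t, ?_, ?_⟩
      · rw [List.dropWhile_cons, if_neg (by simp)]
      · simp [pvSplitP, List.takeWhile_cons]
    · have hp : (fun x => decide (x ≠ '|')) c = true := by simp [hc]
      rcases ih with ⟨h1, h2⟩ | ⟨r, h1, h2⟩
      · left
        refine ⟨?_, ?_⟩
        · rw [List.dropWhile_cons, if_pos hp]; exact h1
        · simp only [pvSplitP, if_neg hc, h2, List.modifyHead]
          rw [List.takeWhile_cons, if_pos hp]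
      · right
        refine ⟨r, ?_, ?_⟩
        · rw [List.dropWhile_cons, if_pos hp]; exact h1
        · simp only [pvSplitP, if_neg hc, h2, List.modifyHead]
          rw [List.takeWhile_cons, if_pos hp]

theorem pv_skipPipe_append (chunk suffix : List Char) (h : ∀ c ∈ chunk, c ≠ '|') :
    pvSkipPipe (chunk ++ suffix) = pvSkipPipe suffix := by
  induction chunk with
  | nil => rfl
  | cons c t ih =>
    simp only [List.cons_append, pvSkipPipe, h c (List.mem_cons_self), if_false]
    exact ih fun x hx => h x (List.mem_cons_of_mem _ hx)

theorem pv_dropWs_append (chunk suffix : List Char)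
    (hs : suffix = [] ∨ ∃ r, suffix = '|' :: r) :
    List.dropWhile PySem.Chars.isspace (chunk ++ suffix)
      = List.dropWhile PySem.Chars.isspace chunk ++ suffix := by
  rw [List.dropWhile_append]
  by_cases he : (List.dropWhile PySem.Chars.isspace chunk).isEmpty = true
  · rw [if_pos he, List.isEmpty_iff.mp he, List.nil_append]
    rcases hs with rfl | ⟨r, rfl⟩
    · rfl
    · simp [List.dropWhile_cons, show PySem.Chars.isspace '|' = false by decide]
  · rw [if_neg he]

theorem pv_takeWhile_append_all (p : Char → Bool) (t s : List Char)
    (h : ∀ c ∈ t, p c = true) : (t ++ s).takeWhile p = t ++ s.takeWhile p := by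
  induction t with
  | nil => rfl
  | cons c r ih =>
    simp only [List.cons_append, List.takeWhile_cons, h c (List.mem_cons_self), if_true]
    rw [ih fun x hx => h x (List.mem_cons_of_mem _ hx)]

theorem pv_takeWhile_nopipe (t suffix : List Char) (h : ∀ c ∈ t, c ≠ '|')
    (hs : suffix = [] ∨ ∃ r, suffix = '|' :: r) :
    (t ++ suffix).takeWhile (· ≠ '|') = t := by
  rw [pv_takeWhile_append_all _ _ _ (fun c hc => by simpa using h c hc)]
  rcases hs with rfl | ⟨r, rfl⟩
  · simp
  · simp [List.takeWhile_cons]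

set_option maxRecDepth 10000 in
theorem pv_takeWhile_pre (u : List Char) :
    (pvPre ++ u).takeWhile (· ≠ '=') = "unconformity_ref".toList := by
  have hall : ∀ c ∈ "unconformity_ref".toList, (fun x => decide (x ≠ '=')) c = true := by
    have h : ("unconformity_ref".toList).all (fun x => decide (x ≠ '=')) = true := by decide
    exact fun c hc => List.all_eq_true.mp h c hc
  rw [show pvPre = "unconformity_ref".toList ++ ['='] by decide, List.append_assoc,
    pv_takeWhile_append_all _ _ _ hall]
  simp [List.takeWhile_cons]

theorem pv_rstrip_prefix (l : List Char) : PySem.Chars.rstrip l <+: l := by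
  have h := (List.dropWhile_suffix (l := l.reverse) (p := PySem.Chars.isspace)).reverse
  simpa [PySem.Chars.rstrip] using h

theorem pv_prefix_iff (j₀ suffix : List Char) (hj : ∀ c ∈ j₀, c ≠ '|')
    (hs : suffix = [] ∨ ∃ r, suffix = '|' :: r) :
    pvPre <+: (j₀ ++ suffix) ↔ pvPre <+: j₀ := by
  constructor
  · intro h
    by_cases hlen : pvPre.length ≤ j₀.length
    · have heq : pvPre = (j₀ ++ suffix).take pvPre.length := List.prefix_iff_eq_take.mp h
      rw [List.take_append_of_le_length hlen] at heq
      rw [heq]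
      exact List.take_prefix _ _
    · rw [not_le] at hlen
      rcases hs with rfl | ⟨r, rfl⟩
      · rw [List.append_nil] at h
        exact absurd h.length_le (by omega)
      · exfalso
        have hi : j₀.length < pvPre.length := hlen
        have hget : pvPre[j₀.length]'hi = (j₀ ++ '|' :: r)[j₀.length]'(by simp) :=
          h.getElem hi
        rw [List.getElem_append_right (le_refl _)] at hget
        simp at hget
        exact absurd (hget ▸ List.getElem_mem hi) (by decide)
  · intro h
    exact h.trans (List.prefix_append _ _)

theorem pv_prefix_rstrip_iff (j₀ : List Char) :
    pvPre <+: j₀ ↔ pvPre <+: PySem.Chars.rstrip j₀ := by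
  constructor
  · intro h
    obtain ⟨t, ht⟩ := h
    rw [← ht, pv_rstrip_pre_append]
    exact List.prefix_append _ _
  · intro h
    exact h.trans (pv_rstrip_prefix j₀)

theorem pv_cond_eq (j₀ suffix : List Char) (hj : ∀ c ∈ j₀, c ≠ '|')
    (hs : suffix = [] ∨ ∃ r, suffix = '|' :: r) :
    pvPre.isPrefixOf (j₀ ++ suffix) = pvPre.isPrefixOf (PySem.Chars.rstrip j₀) := by
  have hiff := (pv_prefix_iff j₀ suffix hj hs).trans (pv_prefix_rstrip_iff j₀)
  rw [← List.isPrefixOf_iff_prefix, ← List.isPrefixOf_iff_prefix] at hiff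
  cases hb : pvPre.isPrefixOf (j₀ ++ suffix)
  · cases hb' : pvPre.isPrefixOf (PySem.Chars.rstrip j₀)
    · rfl
    · exact absurd (hiff.mpr hb') (by simp [hb])
  · exact (hiff.mp hb).symm

-- the value taken from a matching chunk is the same on both sides
theorem pv_value_core (u : List Char) :
    PySem.Chars.strip ((PySem.Chars.splitOnMax (PySem.Chars.rstrip (pvPre ++ u)) ['='] 1).getD 1 [])
      = PySem.Chars.strip u := by
  rw [pv_rstrip_pre_append, pv_splitOnMax_eq _ (List.mem_append_left _ (by decide)),
    pv_takeWhile_pre,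
    show ("unconformity_ref".toList).length + 1 = pvPre.length by decide, List.drop_left]
  simp [pv_strip_rstrip]

-- the main induction: A's loop over the chunks equals B's scan
theorem pv_main_aux : ∀ (n : Nat) (cs : List Char), cs.length ≤ n →
    pvLoopA (pvSplitP cs) = pvScan cs := by
  intro n
  induction n with
  | zero =>
    intro cs h
    have hnil : cs = [] := by cases cs with
      | nil => rfl
      | cons a b => simp at h
    subst hnil
    rw [pvScan]
    simp [pvLoopA, pvSplitP, pvSkipPipe, PySem.Chars.strip, PySem.Chars.lstrip,
      PySem.Chars.rstrip, PySem.Chars.startswith]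
  | succ n ih =>
    intro cs hlen
    rcases pv_splitP_struct cs with ⟨h1, h2⟩ | ⟨r, h1, h2⟩
    · -- cs contains no '|': the only chunk is cs itself
      have hch : cs.takeWhile (· ≠ '|') = cs := by
        have h := List.takeWhile_append_dropWhile (p := fun x => decide (x ≠ '|')) (l := cs)
        rw [h1, List.append_nil] at h
        exact h
      rw [h2, hch]
      have hnp : ∀ c ∈ cs, c ≠ '|' := fun c hc => by
        simpa using List.dropWhile_eq_nil_iff.mp h1 c hc
      have hjnp : ∀ c ∈ List.dropWhile PySem.Chars.isspace cs, c ≠ '|' :=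
        fun c hc => hnp c ((List.dropWhile_sublist _).subset hc)
      have hcond := pv_cond_eq (List.dropWhile PySem.Chars.isspace cs) [] hjnp (Or.inl rfl)
      rw [List.append_nil] at hcond
      rw [pvScan]
      simp only [pvLoopA, PySem.Chars.startswith,
        show ("unconformity_ref=".toList) = pvPre from rfl,
        show PySem.Chars.strip cs
          = PySem.Chars.rstrip (List.dropWhile PySem.Chars.isspace cs) from rfl, hcond]
      by_cases hb : pvPre.isPrefixOf (PySem.Chars.rstrip (List.dropWhile PySem.Chars.isspace cs)) = true
      · rw [if_pos hb, if_pos hb]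
        obtain ⟨t, ht⟩ := (pv_prefix_rstrip_iff _).mpr (List.isPrefixOf_iff_prefix.mp hb)
        have htnp : ∀ c ∈ t, c ≠ '|' := fun c hc =>
          hjnp c (ht ▸ List.mem_append_right _ hc)
        rw [← ht, pv_value_core t,
          show (17 : Nat) = pvPre.length by decide, List.drop_left,
          show t.takeWhile (· ≠ '|') = t from by
            simpa using pv_takeWhile_nopipe t [] htnp (Or.inl rfl)]
      · rw [if_neg (by simpa using hb), if_neg (by simpa using hb)]
        have hskip : pvSkipPipe cs = none := by
          have h := pv_skipPipe_append cs [] hnp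
          rwa [List.append_nil] at h
        split
        · rfl
        · rename_i t ht
          rw [hskip] at ht
          cases ht
    · -- cs = chunk ++ '|' :: r
      have hcs : cs.takeWhile (· ≠ '|') ++ '|' :: r = cs := by
        have h := List.takeWhile_append_dropWhile (p := fun x => decide (x ≠ '|')) (l := cs)
        rwa [h1] at h
      rw [h2]
      have hnp : ∀ c ∈ cs.takeWhile (· ≠ '|'), c ≠ '|' := fun c hc => by
        simpa using List.mem_takeWhile_imp hc
      have hjnp : ∀ c ∈ List.dropWhile PySem.Chars.isspace (cs.takeWhile (· ≠ '|')), c ≠ '|' :=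
        fun c hc => hnp c ((List.dropWhile_sublist _).subset hc)
      have hdw : List.dropWhile PySem.Chars.isspace cs
          = List.dropWhile PySem.Chars.isspace (cs.takeWhile (· ≠ '|')) ++ '|' :: r := by
        conv_lhs => rw [← hcs]
        exact pv_dropWs_append _ _ (Or.inr ⟨r, rfl⟩)
      have hcond := pv_cond_eq (List.dropWhile PySem.Chars.isspace (cs.takeWhile (· ≠ '|')))
        ('|' :: r) hjnp (Or.inr ⟨r, rfl⟩)
      have hskip : pvSkipPipe cs = some r := by
        have h := pv_skipPipe_append (cs.takeWhile (· ≠ '|')) ('|' :: r) hnp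
        rw [hcs] at h
        simpa [pvSkipPipe] using h
      have hr : r.length ≤ n := by
        have h := congrArg List.length hcs
        simp at h
        omega
      rw [pvScan]
      simp only [hdw, pvLoopA, PySem.Chars.startswith,
        show ("unconformity_ref=".toList) = pvPre from rfl,
        show PySem.Chars.strip (cs.takeWhile (· ≠ '|'))
          = PySem.Chars.rstrip (List.dropWhile PySem.Chars.isspace (cs.takeWhile (· ≠ '|'))) from rfl,
        hcond]
      by_cases hb : pvPre.isPrefixOf (PySem.Chars.rstrip
          (List.dropWhile PySem.Chars.isspace (cs.takeWhile (· ≠ '|')))) = true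
      · rw [if_pos hb, if_pos hb]
        obtain ⟨t, ht⟩ := (pv_prefix_rstrip_iff _).mpr (List.isPrefixOf_iff_prefix.mp hb)
        have htnp : ∀ c ∈ t, c ≠ '|' := fun c hc =>
          hjnp c (ht ▸ List.mem_append_right _ hc)
        rw [← ht, pv_value_core t, List.append_assoc,
          show (17 : Nat) = pvPre.length by decide, List.drop_left,
          pv_takeWhile_nopipe t ('|' :: r) htnp (Or.inr ⟨r, rfl⟩)]
      · rw [if_neg (by simpa using hb), if_neg (by simpa using hb)]
        rw [ih r hr]
        split
        · rename_i ht
          rw [hskip] at ht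
          cases ht
        · rename_i t ht
          rw [hskip] at ht
          cases ht
          rfl

theorem pv_main (cs : List Char) : pvLoopA (pvSplitP cs) = pvScan cs :=
  pv_main_aux cs.length cs le_rfl

-- ===== VERDICT (by name: the statement is the Claim_ definition above) =====
theorem extract_note_unconformity_ref_py_spec : Claim_equal_extract_note_unconformity_ref_py := by
  intro note _
  unfold Spec_extract_note_unconformity_ref_py
  match note with
  | none => rfl
  | some s =>
    simp only [extract_note_unconformity_ref_py, extract_note_unconformity_ref_py_alt]
    split
    · rfl
    · rw [pv_splitOn_eq, pv_main]
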